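-- pv_equiv track=rewrite | github.com/NimashaArambepola/User-Concern-Prioritazation | src/topic_prioritizer.py | _calculate_thumbs_up
-- ===== SOURCE A (Python) =====
-- def _calculate_thumbs_up(texts, thumbs_up_counts, topic_keywords):
--     thumbs_up_scores = []
--     for keywords in topic_keywords.values():
--         total_thumbs_up = 0
--         for text, thumbs_up in zip(texts, thumbs_up_counts):
--             words = set(text.split())
--             if len(set(keywords) & words) >= 3:
--                 total_thumbs_up += thumbs_up
--         thumbs_up_scores.append(total_thumbs_up)
--     return thumbs_up_scores
-- ===== SOURCE B (Python) =====
-- def _calculate_thumbs_up(texts, thumbs_up_counts, topic_keywords):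
--     # Inverted index: keyword -> list of indices of topics whose keyword set
--     # contains it; then a single pass over the texts counting matches per topic.
--     index = {}
--     n = 0
--     for keywords in topic_keywords.values():
--         for kw in set(keywords):
--             index.setdefault(kw, []).append(n)
--         n += 1
--     scores = [0] * n
--     for text, thumbs_up in zip(texts, thumbs_up_counts):
--         counts = [0] * n
--         for w in set(text.split()):
--             for i in index.get(w, []):
--                 counts[i] += 1
--         scores = [s + thumbs_up if c >= 3 else s for s, c in zip(scores, counts)]
--     return scores
-- ===== Notes on version B (the rewrite author's own statement) =====
-- stated objective: faster
-- what changed: B builds an inverted index (keyword -> list of topic indices) once, then makes a single pass over the texts, splitting each text once and counting per-topic keyword hits by looking each word up in the index, instead of A's per-topic rescan that re-splits every text and computes a set intersection for every topic/text pair.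
import Mathlib
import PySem

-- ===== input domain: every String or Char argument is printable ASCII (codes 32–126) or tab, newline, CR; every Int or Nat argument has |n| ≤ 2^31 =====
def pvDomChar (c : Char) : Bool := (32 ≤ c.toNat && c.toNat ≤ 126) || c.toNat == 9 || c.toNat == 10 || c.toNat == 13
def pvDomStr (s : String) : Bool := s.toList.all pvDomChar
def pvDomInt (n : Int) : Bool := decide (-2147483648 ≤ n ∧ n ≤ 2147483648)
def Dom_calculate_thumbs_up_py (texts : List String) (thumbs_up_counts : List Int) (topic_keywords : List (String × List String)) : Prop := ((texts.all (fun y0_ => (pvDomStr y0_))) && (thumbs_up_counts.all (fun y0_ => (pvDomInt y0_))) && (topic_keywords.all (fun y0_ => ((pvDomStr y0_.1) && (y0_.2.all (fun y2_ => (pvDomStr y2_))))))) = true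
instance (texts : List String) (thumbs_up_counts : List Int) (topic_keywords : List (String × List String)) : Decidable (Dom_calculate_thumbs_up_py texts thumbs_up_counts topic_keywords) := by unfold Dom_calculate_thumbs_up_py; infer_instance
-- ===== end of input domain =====

-- B replaces A's per-topic rescan (a set intersection for every topic/text pair) by an
-- inverted index keyword -> topic indices and a single counting pass over the texts.


-- ===== PORT A =====
def calculate_thumbs_up_py (texts : List String) (thumbs_up_counts : List Int) (topic_keywords : List (String × List String)) : List Int :=
  (topic_keywords.map Prod.snd).foldl
    (fun thumbs_up_scores keywords =>
      thumbs_up_scores ++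
        [(texts.zip thumbs_up_counts).foldl
          (fun total_thumbs_up p =>
            let words := PySem.Set.ofList (PySem.Str.split₀ p.1)
            if 3 ≤ PySem.Set.len (PySem.Set.inter (PySem.Set.ofList keywords) words) then
              total_thumbs_up + p.2
            else total_thumbs_up)
          0])
    []

-- ===== PORT B =====
-- Source B: inverted index built with setdefault(kw, []).append(n) (= insert kw (getD kw [] ++ [n]))
def calculate_thumbs_up_py_alt (texts : List String) (thumbs_up_counts : List Int) (topic_keywords : List (String × List String)) : List Int :=
  let idxn :=
    (topic_keywords.map Prod.snd).foldl
      (fun (p : PySem.Dict String (List Nat) × Nat) keywords =>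
        ((PySem.Set.ofList keywords).foldl
           (fun d kw => d.insert kw (d.getD kw [] ++ [p.2])) p.1,
         p.2 + 1))
      (PySem.Dict.empty, 0)
  let index := idxn.1
  let n := idxn.2
  (texts.zip thumbs_up_counts).foldl
    (fun scores p =>
      let counts :=
        (PySem.Set.ofList (PySem.Str.split₀ p.1)).foldl
          (fun counts w =>
            (index.getD w []).foldl
              (fun (c : List Int) i => c.set i (c.getD i 0 + 1)) counts)
          (List.replicate n 0)
      (scores.zip counts).map (fun q => if 3 ≤ q.2 then q.1 + p.2 else q.1))
    (List.replicate n 0)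

-- ===== PRECONDITION & SPEC =====
def Spec_calculate_thumbs_up_py (texts : List String) (thumbs_up_counts : List Int) (topic_keywords : List (String × List String)) (out : List Int) : Prop := out = calculate_thumbs_up_py_alt texts thumbs_up_counts topic_keywords
instance (texts : List String) (thumbs_up_counts : List Int) (topic_keywords : List (String × List String)) (out : List Int) : Decidable (Spec_calculate_thumbs_up_py texts thumbs_up_counts topic_keywords out) := by unfold Spec_calculate_thumbs_up_py; infer_instance

-- ===== CLAIM (what is proved, stated in full; the proofs are below) =====
def Claim_equal_calculate_thumbs_up_py : Prop := ∀ (texts : List String) (thumbs_up_counts : List Int) (topic_keywords : List (String × List String)), Dom_calculate_thumbs_up_py texts thumbs_up_counts topic_keywords → Spec_calculate_thumbs_up_py texts thumbs_up_counts topic_keywords (calculate_thumbs_up_py texts thumbs_up_counts topic_keywords)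

-- ===== LEMMAS AND PROOFS =====

-- the per-topic keyword "hit count" of a word set W
def pvCnt (k : List String) (W : List String) : Int :=
  (W.countP (fun w => decide (w ∈ PySem.Set.ofList k)) : Int)

-- inner index-building loop over a nodup keyword list: each key's list gains [i] once iff present
lemma pv_idx_inner (l : List String) (hl : l.Nodup) (d : PySem.Dict String (List Nat)) (i : Nat) (w : String) :
    (l.foldl (fun d kw => d.insert kw (d.getD kw [] ++ [i])) d).getD w []
      = d.getD w [] ++ (if w ∈ l then [i] else []) := by
  induction l generalizing d with
  | nil => simp
  | cons kw l ih =>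
      simp only [List.foldl_cons]
      rw [ih hl.of_cons]
      rw [PySem.Dict.getD_insert]
      by_cases h : w = kw
      · subst h
        have : w ∉ l := (List.nodup_cons.mp hl).1
        simp [this]
      · simp [h, List.mem_cons]

-- outer index-building loop: counter and per-key index lists
lemma pv_idx_outer (ks : List (List String)) (d : PySem.Dict String (List Nat)) (m : Nat) :
    (ks.foldl
      (fun (p : PySem.Dict String (List Nat) × Nat) keywords =>
        ((PySem.Set.ofList keywords).foldl
           (fun d kw => d.insert kw (d.getD kw [] ++ [p.2])) p.1,
         p.2 + 1))
      (d, m)).2 = m + ks.length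
    ∧ ∀ w, (ks.foldl
      (fun (p : PySem.Dict String (List Nat) × Nat) keywords =>
        ((PySem.Set.ofList keywords).foldl
           (fun d kw => d.insert kw (d.getD kw [] ++ [p.2])) p.1,
         p.2 + 1))
      (d, m)).1.getD w []
      = d.getD w [] ++ ((ks.zipIdx m).filter (fun q => decide (w ∈ PySem.Set.ofList q.1))).map Prod.snd := by
  induction ks generalizing d m with
  | nil => simp
  | cons k ks ih =>
      simp only [List.foldl_cons, List.zipIdx_cons]
      refine ⟨?_, ?_⟩
      · rw [(ih _ (m + 1)).1]; simp; omega
      · intro w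
        rw [(ih _ (m + 1)).2 w]
        rw [pv_idx_inner _ (PySem.Set.nodup_ofList _)]
        by_cases h : w ∈ k <;> simp [PySem.Set.mem_ofList, h, List.append_assoc]

-- snd components of zipIdx
lemma pv_zipIdx_snd {α : Type} (l : List α) (m : Nat) :
    (l.zipIdx m).map Prod.snd = List.range' m l.length := by
  induction l generalizing m with
  | nil => rfl
  | cons x l ih => simp [List.zipIdx_cons, ih, List.range'_succ]

-- membership in the index list of a word
lemma pv_idx_mem (ks : List (List String)) (w : String) (i : Nat) :
    i ∈ ((ks.zipIdx 0).filter (fun q => decide (w ∈ PySem.Set.ofList q.1))).map Prod.snd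
      ↔ ∃ h : i < ks.length, w ∈ PySem.Set.ofList ks[i] := by
  simp only [List.mem_map, List.mem_filter]
  constructor
  · rintro ⟨⟨a, j⟩, ⟨hmem, hw⟩, rfl⟩
    have := List.mk_mem_zipIdx_iff_getElem?.mp hmem
    have hj : j < ks.length := by
      have := List.getElem?_eq_some_iff.mp this
      exact this.1
    refine ⟨hj, ?_⟩
    have : ks[j] = a := by
      have h2 := List.getElem?_eq_some_iff.mp this
      exact h2.2
    rw [this]
    simpa using hw
  · rintro ⟨h, hw⟩
    exact ⟨(ks[i], i), ⟨List.mk_mem_zipIdx_iff_getElem?.mpr (by simp), by simpa using hw⟩, rfl⟩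

-- the index list of a word has no duplicate topic indices
lemma pv_idx_nodup (ks : List (List String)) (w : String) :
    (((ks.zipIdx 0).filter (fun q => decide (w ∈ PySem.Set.ofList q.1))).map Prod.snd).Nodup := by
  have hsub : (((ks.zipIdx 0).filter (fun q => decide (w ∈ PySem.Set.ofList q.1))).map Prod.snd).Sublist
      ((ks.zipIdx 0).map Prod.snd) :=
    List.Sublist.map Prod.snd List.filter_sublist
  have : ((ks.zipIdx 0).map Prod.snd).Nodup := by
    rw [pv_zipIdx_snd]; exact List.nodup_range'
  exact this.sublist hsub

-- counts[i] += 1 loop over one index list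
lemma pv_bump_len (lst : List Nat) (c : List Int) :
    (lst.foldl (fun (c : List Int) i => c.set i (c.getD i 0 + 1)) c).length = c.length := by
  induction lst generalizing c with
  | nil => rfl
  | cons i lst ih =>
      simp only [List.foldl_cons]
      exact (ih _).trans (by simp)

lemma pv_bump_fold (lst : List Nat) (c : List Int) (j : Nat) (hj : j < c.length) :
    (lst.foldl (fun (c : List Int) i => c.set i (c.getD i 0 + 1)) c).getD j 0
      = c.getD j 0 + (lst.count j : Int) := by
  induction lst generalizing c with
  | nil => simp
  | cons i lst ih =>
      simp only [List.foldl_cons]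
      rw [ih _ (by simpa using hj)]
      by_cases h : i = j
      · subst h
        rw [List.getD_eq_getElem _ _ (by simpa using hj), List.getElem_set_self (by simpa using hj)]
        rw [List.getD_eq_getElem _ _ hj]
        simp
        ring
      · rw [List.getD_eq_getElem _ _ (by simpa using hj), List.getElem_set_ne (by omega)]
        rw [List.getD_eq_getElem _ _ hj]
        simp [h]

-- word loop accumulating all index lists
lemma pv_counts_len (W : List String) (idx : String → List Nat) (c : List Int) :
    (W.foldl (fun c w => (idx w).foldl (fun (c : List Int) i => c.set i (c.getD i 0 + 1)) c) c).length
      = c.length := by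
  induction W generalizing c with
  | nil => rfl
  | cons w W ih =>
      simp only [List.foldl_cons]
      exact (ih _).trans (pv_bump_len _ _)

lemma pv_counts_fold (W : List String) (idx : String → List Nat) (c : List Int) (j : Nat)
    (hj : j < c.length) :
    (W.foldl (fun c w => (idx w).foldl (fun (c : List Int) i => c.set i (c.getD i 0 + 1)) c) c).getD j 0
      = c.getD j 0 + (W.map (fun w => ((idx w).count j : Int))).sum := by
  induction W generalizing c with
  | nil => simp
  | cons w W ih =>
      simp only [List.foldl_cons, List.map_cons, List.sum_cons]
      rw [ih _ (by rw [pv_bump_len]; exact hj), pv_bump_fold _ _ _ hj]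
      ring

-- count of j in the index list is the 0/1 membership indicator
lemma pv_idx_count (ks : List (List String)) (w : String) (j : Nat) (hj : j < ks.length) :
    ((((ks.zipIdx 0).filter (fun q => decide (w ∈ PySem.Set.ofList q.1))).map Prod.snd).count j : Int)
      = if w ∈ PySem.Set.ofList ks[j] then 1 else 0 := by
  by_cases h : w ∈ PySem.Set.ofList ks[j]
  · rw [List.count_eq_one_of_mem (pv_idx_nodup ks w) ((pv_idx_mem ks w j).mpr ⟨hj, h⟩)]
    simp [h]
  · rw [List.count_eq_zero.mpr]
    · simp [h]
    · intro hmem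
      obtain ⟨h1, h2⟩ := (pv_idx_mem ks w j).mp hmem
      exact h h2

-- the counts list computed for a word set W is the per-topic hit-count vector
lemma pv_counts_eq (ks : List (List String)) (W : List String) :
    (W.foldl
        (fun c w =>
          ((((ks.zipIdx 0).filter (fun q => decide (w ∈ PySem.Set.ofList q.1))).map Prod.snd).foldl
            (fun (c : List Int) i => c.set i (c.getD i 0 + 1)) c))
        (List.replicate ks.length 0))
      = ks.map (fun k => pvCnt k W) := by
  apply List.ext_getElem
  · rw [pv_counts_len]; simp
  · intro j h1 h2
    have hlen : j < (List.replicate ks.length (0:Int)).length := by simpa using h2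
    have := pv_counts_fold W
      (fun w => (((ks.zipIdx 0).filter (fun q => decide (w ∈ PySem.Set.ofList q.1))).map Prod.snd))
      (List.replicate ks.length 0) j hlen
    rw [← List.getD_eq_getElem _ 0 h1, this]
    have hj : j < ks.length := by simpa using h2
    have : (W.map (fun w =>
        (((((ks.zipIdx 0).filter (fun q => decide (w ∈ PySem.Set.ofList q.1))).map Prod.snd).count j) : Int))).sum
        = (W.map (fun w => if w ∈ PySem.Set.ofList ks[j] then (1:Int) else 0)).sum := by
      apply congrArg
      apply List.map_congr_left
      intro w hw
      exact pv_idx_count ks w j hj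
    rw [this]
    have : (W.map (fun w => if w ∈ PySem.Set.ofList ks[j] then (1:Int) else 0)).sum
        = (W.countP (fun w => decide (w ∈ PySem.Set.ofList ks[j])) : Int) := by
      have := PySem.List.sum_map_ite_one_zero (fun w => decide (w ∈ PySem.Set.ofList ks[j])) W
      simpa using this
    rw [this]
    simp [pvCnt]

-- two nodup lists: counting common elements is symmetric
lemma pv_filter_comm (s t : List String) (hs : s.Nodup) (ht : t.Nodup) :
    (s.filter (fun x => decide (x ∈ t))).length = (t.filter (fun x => decide (x ∈ s))).length := by
  apply List.Perm.length_eq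
  rw [List.perm_ext_iff_of_nodup (hs.filter _) (ht.filter _)]
  intro a
  simp only [List.mem_filter, decide_eq_true_eq]
  tauto

-- A's intersection size equals B's hit count
lemma pv_cond_eq (k : List String) (text : String) :
    PySem.Set.len (PySem.Set.inter (PySem.Set.ofList k) (PySem.Set.ofList (PySem.Str.split₀ text)))
      = pvCnt k (PySem.Set.ofList (PySem.Str.split₀ text)) := by
  unfold pvCnt
  rw [List.countP_eq_length_filter]
  simp only [PySem.Set.len, PySem.Set.inter]
  rw [Nat.cast_inj]
  have h1 : (PySem.Set.ofList k).filter
      (fun x => (PySem.Set.ofList (PySem.Str.split₀ text)).contains x)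
      = (PySem.Set.ofList k).filter (fun x => decide (x ∈ PySem.Set.ofList (PySem.Str.split₀ text))) := by
    apply List.filter_congr
    intro x _
    simp
  rw [h1, pv_filter_comm _ _ (PySem.Set.nodup_ofList _) (PySem.Set.nodup_ofList _)]

lemma pv_zip_map_self {α β : Type} (f : α → β) (l : List α) :
    (l.map f).zip l = l.map (fun x => (f x, x)) := by
  induction l with
  | nil => rfl
  | cons x xs ih => simp [ih]

-- Loop-interchange: B's single pass over the texts, started from per-topic values h k,
-- ends at the per-topic folds A computes.
lemma pv_interchange {γ : Type} (c : γ → (String × Int) → Prop)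
    [∀ k p, Decidable (c k p)] (L : List (String × Int)) (ks : List γ)
    (h : γ → Int) :
    L.foldl
      (fun scores p =>
        (scores.zip ks).map (fun q => if c q.2 p then q.1 + p.2 else q.1))
      (ks.map h)
    = ks.map (fun k => L.foldl (fun tot p => if c k p then tot + p.2 else tot) (h k)) := by
  induction L generalizing h with
  | nil => rfl
  | cons p L ih =>
      simp only [List.foldl_cons]
      rw [pv_zip_map_self, List.map_map]
      have := ih (fun k => if c k p then h k + p.2 else h k)
      simpa [Function.comp] using this

-- map over zip with a mapped right component, for B's score-update step
lemma pv_zip_map_snd (scores : List Int) (ks : List (List String)) (f : List String → Int) (t : Int) :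
    (scores.zip (ks.map f)).map (fun q => if 3 ≤ q.2 then q.1 + t else q.1)
      = (scores.zip ks).map (fun q => if 3 ≤ f q.2 then q.1 + t else q.1) := by
  induction scores generalizing ks with
  | nil => rfl
  | cons s scores ih =>
      cases ks with
      | nil => rfl
      | cons k ks => simp [ih]

-- ===== VERDICT (by name: the statement is the Claim_ definition above) =====
theorem calculate_thumbs_up_py_spec : Claim_equal_calculate_thumbs_up_py := by
  intro texts thumbs tk _
  unfold Spec_calculate_thumbs_up_py calculate_thumbs_up_py calculate_thumbs_up_py_alt
  dsimp only
  obtain ⟨hn, hidx⟩ := pv_idx_outer (tk.map Prod.snd) PySem.Dict.empty 0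
  rw [PySem.List.foldl_append_singleton_eq_map, List.nil_append]
  simp only [hn, Nat.zero_add]
  simp only [hidx, PySem.Dict.getD_empty, List.nil_append]
  simp only [pv_counts_eq]
  simp only [pv_zip_map_snd]
  rw [show List.replicate (tk.map Prod.snd).length (0:Int) = (tk.map Prod.snd).map (fun _ => 0) from by simp [Function.comp_def, List.map_const']]
  rw [pv_interchange (fun (k : List String) (p : String × Int) => 3 ≤ pvCnt k (PySem.Set.ofList (PySem.Str.split₀ p.1))) (texts.zip thumbs) (tk.map Prod.snd) (fun _ => 0)]
  apply List.map_congr_left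
  intro k hk
  have hfun : (fun (total_thumbs_up : Int) (p : String × Int) =>
      if 3 ≤ PySem.Set.len (PySem.Set.inter (PySem.Set.ofList k) (PySem.Set.ofList (PySem.Str.split₀ p.1))) then
        total_thumbs_up + p.2
      else total_thumbs_up)
      = (fun (tot : Int) (p : String × Int) =>
      if 3 ≤ pvCnt k (PySem.Set.ofList (PySem.Str.split₀ p.1)) then tot + p.2 else tot) := by
    funext tot p
    rw [pv_cond_eq]
  rw [hfun]
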